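-- pv_equiv track=rewrite | github.com/greatsandro1980/daguailuzi-ai | train/generate_play_data.py | _small_first_strategy
-- ===== SOURCE A (Python) =====
-- from typing import List, Dict, Tuple
--
-- def _small_first_strategy(hand: List[int], legal_actions: List[List[int]],
--                           is_first: bool) -> List[int]:
--     """小牌优先策略"""
--     if not legal_actions:
--         return []
--
--     # 按张数分组
--     by_size = {}
--     for action in legal_actions:
--         n = len(action)
--         if n not in by_size:
--             by_size[n] = []
--         by_size[n].append(action)
--
--     # 优先顺序：5张 > 3张 > 2张 > 1张（减少手数）
--     for size in [5, 3, 2, 1]: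
--         if size in by_size:
--             # 同张数里选rank最小的
--             actions = by_size[size]
--             return min(actions, key=lambda a: max(c // 4 for c in a))
--
--     return legal_actions[0]
-- ===== SOURCE B (Python) =====
-- from typing import List
--
-- def _small_first_strategy(hand: List[int], legal_actions: List[List[int]],
--                           is_first: bool) -> List[int]:
--     """小牌优先策略 — one global min over a lexicographic (priority, rank) key
--     instead of grouping by size and scanning priority classes."""
--     if not legal_actions:
--         return []
--     prio = {5: 0, 3: 1, 2: 2, 1: 3}
--     eligible = [a for a in legal_actions if len(a) in prio]
--     if not eligible:
--         return legal_actions[0]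
--     return min(eligible, key=lambda a: (prio[len(a)], max(c // 4 for c in a)))
-- ===== Notes on version B (the rewrite author's own statement) =====
-- stated objective: alternative
-- what changed: Replaces A's group-by-size dict plus staged scan over priority classes 5,3,2,1 by a single global min over the eligible actions under one lexicographic (priority-index, rank) key.
import Mathlib
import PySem

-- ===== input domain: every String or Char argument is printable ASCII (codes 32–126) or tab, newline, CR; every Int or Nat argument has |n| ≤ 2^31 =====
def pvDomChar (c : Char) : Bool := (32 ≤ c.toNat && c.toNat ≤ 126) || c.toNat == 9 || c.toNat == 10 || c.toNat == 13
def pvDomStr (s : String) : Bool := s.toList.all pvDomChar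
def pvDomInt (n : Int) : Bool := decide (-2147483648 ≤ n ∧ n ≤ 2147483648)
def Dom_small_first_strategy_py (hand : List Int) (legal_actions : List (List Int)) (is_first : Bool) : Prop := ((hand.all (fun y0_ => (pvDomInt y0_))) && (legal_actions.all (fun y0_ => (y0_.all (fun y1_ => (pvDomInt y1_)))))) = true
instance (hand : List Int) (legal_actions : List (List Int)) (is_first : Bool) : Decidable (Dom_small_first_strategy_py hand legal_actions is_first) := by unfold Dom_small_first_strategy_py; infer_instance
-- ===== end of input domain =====

-- B replaces A's group-by-size dict and staged priority scan by one global min over a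
-- lexicographic (priority-index, rank) key (objective: alternative).

-- ===== PORT A =====
-- key of min(actions, key=lambda a: max(c // 4 for c in a)); the .getD 0 default is never
-- reached: both Pythons only apply it to actions of length 5/3/2/1, which are non-empty
def pvRank (a : List Int) : Int :=
  (PySem.List.max? (a.map (fun c => PySem.Int.floordiv c 4)) (fun x => x)).getD 0

-- min(actions, key=…): PySem.List.min? is Python's min (first minimal); callers pass non-empty lists
def pvMinRank (actions : List (List Int)) : List Int :=
  (PySem.List.min? actions pvRank).getD []

-- 'for size in [5, 3, 2, 1]: if size in by_size: return min(by_size[size], …)' then 'return legal_actions[0]'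
def pvPickA (by_size : PySem.Dict Int (List (List Int))) (legal_actions : List (List Int)) : List Int → List Int
  | [] => PySem.List.pyGetD legal_actions 0 []
  | s :: rest =>
    if by_size.contains s then pvMinRank (by_size.getD s [])
    else pvPickA by_size legal_actions rest

def small_first_strategy_py (hand : List Int) (legal_actions : List (List Int)) (is_first : Bool) : List Int :=
  if legal_actions.isEmpty then []
  else
    -- 'if n not in by_size: by_size[n] = []; by_size[n].append(action)' = Dict.modify n [] (· ++ [action])
    let by_size : PySem.Dict Int (List (List Int)) :=
      legal_actions.foldl (fun d action => d.modify (PySem.List.len action) [] (fun l => l ++ [action])) PySem.Dict.empty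
    pvPickA by_size legal_actions [5, 3, 2, 1]

-- ===== PORT B =====
-- prio = {5: 0, 3: 1, 2: 2, 1: 3}
def pvPrio : PySem.Dict Int Int := PySem.Dict.ofList [(5, 0), (3, 1), (2, 2), (1, 3)]

-- prio[len(a)]; the .getD 0 default is never reached: only applied to eligible actions
def pvPrioOf (a : List Int) : Int := pvPrio.getD (PySem.List.len a) 0

def small_first_strategy_py_alt (hand : List Int) (legal_actions : List (List Int)) (is_first : Bool) : List Int :=
  if legal_actions.isEmpty then []
  else
    -- eligible = [a for a in legal_actions if len(a) in prio]
    let eligible := legal_actions.filter (fun a => pvPrio.contains (PySem.List.len a))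
    if eligible.isEmpty then PySem.List.pyGetD legal_actions 0 []
    else
      -- min(eligible, key=lambda a: (prio[len(a)], max(c // 4 for c in a))) — tuple key = min2?
      (PySem.List.min2? eligible pvPrioOf pvRank).getD []

-- ===== PRECONDITION & SPEC =====
def Spec_small_first_strategy_py (hand : List Int) (legal_actions : List (List Int)) (is_first : Bool) (out : List Int) : Prop := out = small_first_strategy_py_alt hand legal_actions is_first
instance (hand : List Int) (legal_actions : List (List Int)) (is_first : Bool) (out : List Int) : Decidable (Spec_small_first_strategy_py hand legal_actions is_first out) := by unfold Spec_small_first_strategy_py; infer_instance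

-- ===== CLAIM (what is proved, stated in full; the proofs are below) =====
def Claim_equal_small_first_strategy_py : Prop := ∀ (hand : List Int) (legal_actions : List (List Int)) (is_first : Bool), Dom_small_first_strategy_py hand legal_actions is_first → Spec_small_first_strategy_py hand legal_actions is_first (small_first_strategy_py hand legal_actions is_first)

-- ===== LEMMAS AND PROOFS =====

-- proof-side restatement of A's staged scan with the grouping dict replaced by direct filters
def pvTrySizes (legal_actions : List (List Int)) : List Int → List Int
  | [] => PySem.List.pyGetD legal_actions 0 []
  | s :: rest =>
    let candidates := legal_actions.filter (fun a => PySem.List.len a == s)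
    if candidates.isEmpty then pvTrySizes legal_actions rest
    else pvMinRank candidates

-- A's grouping dict looked up at s is exactly the filter of legal_actions at size s
theorem pv_getD_group (legal_actions : List (List Int)) (s : Int) :
    (legal_actions.foldl (fun d action => d.modify (PySem.List.len action) [] (fun l => l ++ [action])) PySem.Dict.empty).getD s []
      = legal_actions.filter (fun a => PySem.List.len a == s) := by
  have h := PySem.Dict.getD_foldl_modify_append
    (l := legal_actions.map (fun a => (PySem.List.len a, a)))
    (d := (PySem.Dict.empty : PySem.Dict Int (List (List Int)))) (c := s)
  simp only [List.foldl_map] at h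
  simpa [List.filter_map, List.map_map, Function.comp_def, PySem.List.len_eq] using h

theorem pv_contains_group (legal_actions : List (List Int)) (s : Int) :
    (legal_actions.foldl (fun d action => d.modify (PySem.List.len action) [] (fun l => l ++ [action])) PySem.Dict.empty).contains s
      = !(legal_actions.filter (fun a => PySem.List.len a == s)).isEmpty := by
  rw [PySem.Dict.contains_eq_decide_mem_keys]
  rw [PySem.Dict.keys_foldl_modify_key (key := fun a => PySem.List.len a)]
  simp only [PySem.Set.mem_update, PySem.Dict.keys_empty, List.mem_map]
  by_cases hx : ∃ a ∈ legal_actions, (a.length : Int) = s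
  · obtain ⟨a, ha, hs⟩ := hx
    have : a ∈ legal_actions.filter (fun a => PySem.List.len a == s) :=
      List.mem_filter.mpr ⟨ha, by simp [PySem.List.len_eq, hs]⟩
    simp only [List.isEmpty_eq_false_iff_exists_mem.mpr ⟨a, this⟩]
    simp
    exact ⟨a, ha, hs⟩
  · have : legal_actions.filter (fun a => PySem.List.len a == s) = [] := by
      rw [List.filter_eq_nil_iff]; intro a ha
      simp only [PySem.List.len_eq, beq_iff_eq]; exact fun hs => hx ⟨a, ha, hs⟩
    simp only [this, List.isEmpty_nil]
    simp
    rintro a ha hs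
    exact hx ⟨a, ha, hs⟩

theorem pv_pick_eq (legal_actions : List (List Int)) (sizes : List Int) :
    pvPickA (legal_actions.foldl (fun d action => d.modify (PySem.List.len action) [] (fun l => l ++ [action])) PySem.Dict.empty) legal_actions sizes
      = pvTrySizes legal_actions sizes := by
  induction sizes with
  | nil => rfl
  | cons s rest ih =>
    simp only [pvPickA, pvTrySizes, pv_getD_group, pv_contains_group, ih]
    rcases h : (legal_actions.filter (fun a => PySem.List.len a == s)).isEmpty with _ | _ <;> simp

-- ===== lexicographic-min lemmas =====

-- once the running minimum has the least first key p, min2?'s fold only reacts to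
-- elements with first key p, and on those it is min?'s fold on the second key
theorem pv_fold_lex_inv {α : Type} (k1 k2 : α → Int) (p : Int) (xs : List α) :
    ∀ (m : α), k1 m = p → (∀ x ∈ xs, p ≤ k1 x) →
    xs.foldl (fun acc x =>
        match acc with
        | none => some x
        | some m => if (decide (k1 x < k1 m) || !decide (k1 m < k1 x) && decide (k2 x < k2 m)) = true then some x else some m)
      (some m)
      = (xs.filter (fun x => k1 x == p)).foldl (fun acc x =>
        match acc with
        | none => some x
        | some m => if k2 x < k2 m then some x else some m) (some m) := by
  induction xs with
  | nil => intro m _ _; rfl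
  | cons x rest ih =>
    intro m hm hle
    have hxp : p ≤ k1 x := hle x (List.mem_cons_self)
    by_cases hx : k1 x = p
    · simp only [List.foldl_cons, List.filter_cons, hx, hm, beq_self_eq_true, if_pos,
        lt_self_iff_false, decide_false, Bool.false_or]
      by_cases h2 : k2 x < k2 m
      · simp only [h2, decide_true, if_pos]
        exact ih x hx (fun y hy => hle y (List.mem_cons_of_mem _ hy))
      · simp only [h2, decide_false, if_false]
        exact ih m hm (fun y hy => hle y (List.mem_cons_of_mem _ hy))
    · have hgt : p < k1 x := lt_of_le_of_ne hxp (fun h => hx h.symm)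
      have h1 : ¬ k1 x < k1 m := by omega
      have h2 : k1 m < k1 x := by omega
      simp only [List.foldl_cons, List.filter_cons, h1, decide_false, h2, decide_true,
        Bool.not_true, Bool.false_and, Bool.false_or]
      have : (k1 x == p) = false := by simp [hx]
      simp only [this]
      exact ih m hm (fun y hy => hle y (List.mem_cons_of_mem _ hy))

-- starting from none (or a strictly worse first key), min2?'s fold equals min?'s fold
-- on the filter at the least first key p, provided that filter is non-empty
theorem pv_fold_lex_start {α : Type} (k1 k2 : α → Int) (p : Int) (xs : List α) :
    ∀ (acc : Option α), (∀ x ∈ xs, p ≤ k1 x) →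
    (acc = none ∨ ∃ m, acc = some m ∧ p < k1 m) →
    (xs.filter (fun x => k1 x == p)) ≠ [] →
    xs.foldl (fun acc x =>
        match acc with
        | none => some x
        | some m => if (decide (k1 x < k1 m) || !decide (k1 m < k1 x) && decide (k2 x < k2 m)) = true then some x else some m)
      acc
      = (xs.filter (fun x => k1 x == p)).foldl (fun acc x =>
        match acc with
        | none => some x
        | some m => if k2 x < k2 m then some x else some m) none := by
  induction xs with
  | nil => intro acc _ _ hne; exact absurd rfl hne
  | cons x rest ih =>
    intro acc hle hacc hne
    have hxp : p ≤ k1 x := hle x (List.mem_cons_self)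
    have hrest : ∀ y ∈ rest, p ≤ k1 y := fun y hy => hle y (List.mem_cons_of_mem _ hy)
    by_cases hx : k1 x = p
    · -- x becomes the running minimum with least first key
      have hstep : (List.foldl (fun acc x =>
          match acc with
          | none => some x
          | some m => if (decide (k1 x < k1 m) || !decide (k1 m < k1 x) && decide (k2 x < k2 m)) = true then some x else some m)
          acc (x :: rest))
          = List.foldl (fun acc x =>
          match acc with
          | none => some x
          | some m => if (decide (k1 x < k1 m) || !decide (k1 m < k1 x) && decide (k2 x < k2 m)) = true then some x else some m)
          (some x) rest := by
        rcases hacc with h | ⟨m, hm, hgt⟩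
        · rw [h]; rfl
        · rw [hm]
          have : k1 x < k1 m := by omega
          simp [List.foldl_cons, this]
      rw [hstep]
      have hfx : (k1 x == p) = true := by simp [hx]
      simp only [List.filter_cons, hfx, if_pos, List.foldl_cons]
      exact pv_fold_lex_inv k1 k2 p rest x hx hrest
    · have hgt : p < k1 x := lt_of_le_of_ne hxp (fun h => hx h.symm)
      have hfx : (k1 x == p) = false := by simp [hx]
      have hne' : (rest.filter (fun x => k1 x == p)) ≠ [] := by
        simpa [List.filter_cons, hfx] using hne
      have hacc' : (match acc with
          | none => some x
          | some m => if (decide (k1 x < k1 m) || !decide (k1 m < k1 x) && decide (k2 x < k2 m)) = true then some x else some m) = none ∨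
          ∃ m', (match acc with
          | none => some x
          | some m => if (decide (k1 x < k1 m) || !decide (k1 m < k1 x) && decide (k2 x < k2 m)) = true then some x else some m) = some m' ∧ p < k1 m' := by
        rcases hacc with h | ⟨m, hm, hgtm⟩
        · right; exact ⟨x, by rw [h], hgt⟩
        · right
          rw [hm]
          by_cases hc : (decide (k1 x < k1 m) || !decide (k1 m < k1 x) && decide (k2 x < k2 m)) = true
        -- either x or m survives; both have first key > p
          · exact ⟨x, by simp [hc], hgt⟩
          · exact ⟨m, by simp [hc], hgtm⟩
      rw [List.foldl_cons, ih _ hrest hacc' hne']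
      simp [hfx]

-- min2? over xs with least first key p = min? on the second key over the filter at p
theorem pv_min2_eq_min_filter {α : Type} (k1 k2 : α → Int) (p : Int) (xs : List α)
    (hle : ∀ x ∈ xs, p ≤ k1 x) (hne : xs.filter (fun x => k1 x == p) ≠ []) :
    PySem.List.min2? xs k1 k2 = PySem.List.min? (xs.filter (fun x => k1 x == p)) k2 := by
  simp only [PySem.List.min2?, PySem.List.min?]
  exact pv_fold_lex_start k1 k2 p xs none hle (Or.inl rfl) hne

-- pvPrio facts on an arbitrary key n
theorem pv_prio_mk : pvPrio = PySem.Dict.mk [(5, 0), (3, 1), (2, 2), (1, 3)] := by decide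

theorem pv_prio_contains (n : Int) :
    pvPrio.contains n = (n == 5 || n == 3 || n == 2 || n == 1) := by
  by_cases h5 : n = 5
  · subst h5; decide
  by_cases h3 : n = 3
  · subst h3; decide
  by_cases h2 : n = 2
  · subst h2; decide
  by_cases h1 : n = 1
  · subst h1; decide
  have hc : pvPrio.contains n = false := by
    rw [pv_prio_mk]
    simp [PySem.Dict.contains]
    omega
  simp [hc, h5, h3, h2, h1]

theorem pv_prio_key (n : Int) (i s : Int)
    (his : (s = 5 ∧ i = 0) ∨ (s = 3 ∧ i = 1) ∨ (s = 2 ∧ i = 2) ∨ (s = 1 ∧ i = 3)) :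
    (pvPrio.contains n && (pvPrio.getD n 0 == i)) = (n == s) := by
  by_cases h5 : n = 5
  · subst h5; rcases his with ⟨hs, hi⟩ | ⟨hs, hi⟩ | ⟨hs, hi⟩ | ⟨hs, hi⟩ <;> subst hs <;> subst hi <;> decide
  by_cases h3 : n = 3
  · subst h3; rcases his with ⟨hs, hi⟩ | ⟨hs, hi⟩ | ⟨hs, hi⟩ | ⟨hs, hi⟩ <;> subst hs <;> subst hi <;> decide
  by_cases h2 : n = 2
  · subst h2; rcases his with ⟨hs, hi⟩ | ⟨hs, hi⟩ | ⟨hs, hi⟩ | ⟨hs, hi⟩ <;> subst hs <;> subst hi <;> decide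
  by_cases h1 : n = 1
  · subst h1; rcases his with ⟨hs, hi⟩ | ⟨hs, hi⟩ | ⟨hs, hi⟩ | ⟨hs, hi⟩ <;> subst hs <;> subst hi <;> decide
  have hc : pvPrio.contains n = false := by
    rw [pv_prio_mk]
    simp [PySem.Dict.contains]
    omega
  rw [hc, Bool.false_and]
  rcases his with ⟨hs, _⟩ | ⟨hs, _⟩ | ⟨hs, _⟩ | ⟨hs, _⟩ <;> subst hs <;> simp [h5, h3, h2, h1]

theorem pv_prio_getD_of (n : Int) :
    (n = 5 → pvPrio.getD n 0 = 0) ∧ (n = 3 → pvPrio.getD n 0 = 1) ∧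
    (n = 2 → pvPrio.getD n 0 = 2) ∧ (n = 1 → pvPrio.getD n 0 = 3) := by
  refine ⟨?_, ?_, ?_, ?_⟩ <;> rintro rfl <;> decide

-- the filter of the eligible list at priority i is the filter of legal_actions at size s
theorem pv_elig_filter (L : List (List Int)) (i s : Int)
    (his : (s = 5 ∧ i = 0) ∨ (s = 3 ∧ i = 1) ∨ (s = 2 ∧ i = 2) ∨ (s = 1 ∧ i = 3)) :
    (L.filter (fun a => pvPrio.contains (PySem.List.len a))).filter (fun a => pvPrioOf a == i)
      = L.filter (fun a => PySem.List.len a == s) := by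
  rw [List.filter_filter]
  apply List.filter_congr
  intro a _
  have := pv_prio_key (PySem.List.len a) i s his
  simpa [pvPrioOf, Bool.and_comm] using this

theorem pv_elig_disj_empty (L : List (List Int)) :
    (L.filter (fun a => (PySem.List.len a == 5 || PySem.List.len a == 3
        || PySem.List.len a == 2 || PySem.List.len a == 1))).isEmpty
      = ((L.filter (fun a => PySem.List.len a == 5)).isEmpty
        && (L.filter (fun a => PySem.List.len a == 3)).isEmpty
        && (L.filter (fun a => PySem.List.len a == 2)).isEmpty
        && (L.filter (fun a => PySem.List.len a == 1)).isEmpty) := by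
  induction L with
  | nil => rfl
  | cons a rest ih =>
    simp only [List.filter_cons]
    by_cases h5 : PySem.List.len a = 5 <;> by_cases h3 : PySem.List.len a = 3 <;>
      by_cases h2 : PySem.List.len a = 2 <;> by_cases h1 : PySem.List.len a = 1 <;>
      simp_all

theorem pv_elig_empty_iff (L : List (List Int)) :
    (L.filter (fun a => pvPrio.contains (PySem.List.len a))).isEmpty
      = ((L.filter (fun a => PySem.List.len a == 5)).isEmpty
        && (L.filter (fun a => PySem.List.len a == 3)).isEmpty
        && (L.filter (fun a => PySem.List.len a == 2)).isEmpty
        && (L.filter (fun a => PySem.List.len a == 1)).isEmpty) := by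
  rw [List.filter_congr (fun a _ => pv_prio_contains (PySem.List.len a)),
    pv_elig_disj_empty]

-- every eligible action has priority index at least i when all smaller-index filters are empty
theorem pv_elig_lb (L : List (List Int)) (a : List Int)
    (ha : a ∈ L.filter (fun a => pvPrio.contains (PySem.List.len a)))
    (i : Int) (hi : i ≤ 3)
    (h5 : 0 < i → L.filter (fun a => PySem.List.len a == 5) = [])
    (h3 : 1 < i → L.filter (fun a => PySem.List.len a == 3) = [])
    (h2 : 2 < i → L.filter (fun a => PySem.List.len a == 2) = []) :
    i ≤ pvPrioOf a := by
  obtain ⟨haL, hc⟩ := List.mem_filter.mp ha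
  rw [pv_prio_contains] at hc
  have hcases : PySem.List.len a = 5 ∨ PySem.List.len a = 3 ∨ PySem.List.len a = 2 ∨ PySem.List.len a = 1 := by
    simp only [Bool.or_eq_true, beq_iff_eq] at hc
    tauto
  have hg := pv_prio_getD_of (PySem.List.len a)
  have hmem : ∀ s : Int, PySem.List.len a = s →
      a ∈ L.filter (fun a => PySem.List.len a == s) :=
    fun s hs => List.mem_filter.mpr ⟨haL, by simpa using hs⟩
  rcases hcases with h | h | h | h
  · -- priority 0: requires i ≤ 0, else the filter at 5 would be empty yet contains a
    have hp : pvPrioOf a = 0 := hg.1 h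
    by_contra hlt
    have he : L.filter (fun a => PySem.List.len a == 5) = [] := h5 (by omega)
    have hm := hmem 5 h
    rw [he] at hm
    simp at hm
  · have hp : pvPrioOf a = 1 := hg.2.1 h
    by_contra hlt
    have he : L.filter (fun a => PySem.List.len a == 3) = [] := h3 (by omega)
    have hm := hmem 3 h
    rw [he] at hm
    simp at hm
  · have hp : pvPrioOf a = 2 := hg.2.2.1 h
    by_contra hlt
    have he : L.filter (fun a => PySem.List.len a == 2) = [] := h2 (by omega)
    have hm := hmem 2 h
    rw [he] at hm
    simp at hm
  · have hp : pvPrioOf a = 3 := hg.2.2.2 h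
    omega

-- the staged scan over sizes [5,3,2,1] equals the single lexicographic min of B
theorem pv_try_eq_lex (L : List (List Int)) :
    pvTrySizes L [5, 3, 2, 1]
      = (if (L.filter (fun a => pvPrio.contains (PySem.List.len a))).isEmpty
          then PySem.List.pyGetD L 0 []
          else (PySem.List.min2? (L.filter (fun a => pvPrio.contains (PySem.List.len a))) pvPrioOf pvRank).getD []) := by
  have key : ∀ (i s : Int),
      ((s = 5 ∧ i = 0) ∨ (s = 3 ∧ i = 1) ∨ (s = 2 ∧ i = 2) ∨ (s = 1 ∧ i = 3)) →
      (0 < i → L.filter (fun a => PySem.List.len a == 5) = []) →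
      (1 < i → L.filter (fun a => PySem.List.len a == 3) = []) →
      (2 < i → L.filter (fun a => PySem.List.len a == 2) = []) →
      (L.filter (fun a => PySem.List.len a == s)).isEmpty = false →
      (PySem.List.min2? (L.filter (fun a => pvPrio.contains (PySem.List.len a))) pvPrioOf pvRank).getD []
        = pvMinRank (L.filter (fun a => PySem.List.len a == s)) := by
    intro i s his h5 h3 h2 hne
    have hfe := pv_elig_filter L i s his
    have hle : ∀ x ∈ L.filter (fun a => pvPrio.contains (PySem.List.len a)), i ≤ pvPrioOf x :=
      fun x hx => pv_elig_lb L x hx i (by rcases his with ⟨_, h⟩ | ⟨_, h⟩ | ⟨_, h⟩ | ⟨_, h⟩ <;> omega) h5 h3 h2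
    have hne' : (L.filter (fun a => pvPrio.contains (PySem.List.len a))).filter (fun a => pvPrioOf a == i) ≠ [] := by
      rw [hfe]
      intro h; rw [h] at hne; simp at hne
    rw [pv_min2_eq_min_filter pvPrioOf pvRank i _ hle hne', hfe, pvMinRank]
  simp only [pvTrySizes]
  cases e5 : (L.filter (fun a => PySem.List.len a == (5:Int))).isEmpty with
  | false =>
    rw [pv_elig_empty_iff, key 0 5 (by tauto)
      (fun h => absurd h (by omega)) (fun h => absurd h (by omega))
      (fun h => absurd h (by omega)) e5]
    simp only [e5, Bool.false_and, Bool.false_eq_true, if_false]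
  | true =>
    have H5 := List.isEmpty_iff.mp e5
    cases e3 : (L.filter (fun a => PySem.List.len a == (3:Int))).isEmpty with
    | false =>
      rw [pv_elig_empty_iff, key 1 3 (by tauto)
        (fun _ => H5) (fun h => absurd h (by omega)) (fun h => absurd h (by omega)) e3]
      simp only [e5, e3, Bool.true_and, Bool.false_and, Bool.false_eq_true, if_true, if_false]
    | true =>
      have H3 := List.isEmpty_iff.mp e3
      cases e2 : (L.filter (fun a => PySem.List.len a == (2:Int))).isEmpty with
      | false =>
        rw [pv_elig_empty_iff, key 2 2 (by tauto)
          (fun _ => H5) (fun _ => H3) (fun h => absurd h (by omega)) e2]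
        simp only [e5, e3, e2, Bool.true_and, Bool.false_and, Bool.false_eq_true, if_true, if_false]
      | true =>
        have H2 := List.isEmpty_iff.mp e2
        cases e1 : (L.filter (fun a => PySem.List.len a == (1:Int))).isEmpty with
        | false =>
          rw [pv_elig_empty_iff, key 3 1 (by tauto)
            (fun _ => H5) (fun _ => H3) (fun _ => H2) e1]
          simp only [e5, e3, e2, e1, Bool.true_and, Bool.and_false, Bool.false_eq_true, if_true, if_false]
        | true =>
          rw [pv_elig_empty_iff]
          simp only [e5, e3, e2, e1, Bool.and_self, if_true]

-- ===== VERDICT (by name: the statement is the Claim_ definition above) =====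
theorem small_first_strategy_py_spec : Claim_equal_small_first_strategy_py := by
  intro hand legal_actions is_first _
  unfold Spec_small_first_strategy_py small_first_strategy_py small_first_strategy_py_alt
  by_cases h : legal_actions.isEmpty
  · simp [h]
  · rw [if_neg h, if_neg h, pv_pick_eq legal_actions [5, 3, 2, 1], pv_try_eq_lex]
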